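-- pv_equiv track=rewrite | github.com/gh0stintheshe11/LeetCode-Solutions | solutions/maximum-number-of-books-you-can-take/Python3.py | maximumBooks
-- ===== SOURCE A (Python) =====
-- from typing import List
--
-- def maximumBooks(A: List[int]) -> int:
--     n = len(A)
--
--     res = 0
--     st = []
--     ss = 0
--     for i in range(n):
--         while st and A[st[-1]] + (i-st[-1]) >= A[i]:
--             j = st.pop()
--             l = j - st[-1] if st else min(j+1, A[j])
--             s = (A[j]+A[j]-l+1) * l //2
--             ss -= s
--
--         l = i - st[-1] if st else min(i+1, A[i])
--         s = (A[i]+A[i]-l+1) * l //2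
--         ss += s
--         st.append(i)
--         res = max(res, ss)
--     return res
-- ===== SOURCE B (Python) =====
-- def maximumBooks(A):
--     # Quadratic stack-free rewrite: for each shelf i, find the previous index
--     # whose "key" A[j]-j is strictly smaller by a plain backward scan, and
--     # chain dp values through those links.
--     dp = []
--     best = 0
--     for i in range(len(A)):
--         prev = -1
--         for j in range(i - 1, -1, -1):
--             if A[j] - j < A[i] - i:
--                 prev = j
--                 break
--         if prev >= 0:
--             l = i - prev
--             base = dp[prev]
--         else:
--             l = min(i + 1, A[i])
--             base = 0
--         cnt = base + (A[i] + A[i] - l + 1) * l // 2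
--         dp.append(cnt)
--         best = max(best, cnt)
--     return best
-- ===== Notes on version B (the rewrite author's own statement) =====
-- stated objective: alternative
-- what changed: Removes the monotonic stack and the running-sum undo bookkeeping entirely: for each i a plain backward scan finds the previous index j with A[j]-j < A[i]-i, and dp values are chained through those links (dp[i] = dp[prev] + closed-form segment sum), with a running best; trades O(n) for a simpler O(n^2) scan.
import Mathlib
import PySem

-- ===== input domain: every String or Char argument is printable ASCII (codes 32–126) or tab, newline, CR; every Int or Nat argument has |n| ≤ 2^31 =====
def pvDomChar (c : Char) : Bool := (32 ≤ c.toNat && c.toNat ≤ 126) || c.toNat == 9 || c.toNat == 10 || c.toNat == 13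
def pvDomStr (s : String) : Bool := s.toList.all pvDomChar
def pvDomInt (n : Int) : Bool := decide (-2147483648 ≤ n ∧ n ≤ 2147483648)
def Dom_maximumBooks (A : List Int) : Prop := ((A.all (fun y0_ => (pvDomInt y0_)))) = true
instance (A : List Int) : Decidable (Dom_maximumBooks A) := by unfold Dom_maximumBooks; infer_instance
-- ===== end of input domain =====

-- B removes A's monotonic stack and running-sum undo bookkeeping: a plain backward scan finds
-- the previous index with strictly smaller A[j]-j and dp values are chained through those links
-- (objective: alternative, O(n^2) instead of O(n)).

-- ===== PORT A =====
def pvGet (A : List Int) (j : Int) : Int := PySem.List.pyGetD A j 0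

-- 'l' and 's' of A's two symmetric blocks: segment value for index j with the stack below it
def pvSeg (A : List Int) (j : Int) (rest : List Int) : Int :=
  let l := match rest with
    | p :: _ => j - p
    | [] => min (j + 1) (pvGet A j)
  PySem.Int.floordiv ((pvGet A j + pvGet A j - l + 1) * l) 2

-- A's inner while loop: pop and subtract the popped segment value from ss
def pvPopA (A : List Int) (i : Int) : List Int → Int → List Int × Int
  | [], ss => ([], ss)
  | j :: rest, ss =>
    if pvGet A j + (i - j) ≥ pvGet A i then
      pvPopA A i rest (ss - pvSeg A j rest)
    else (j :: rest, ss)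

def pvStepA (A : List Int) (state : Int × List Int × Int) (i : Int) : Int × List Int × Int :=
  let (res, st0, ss0) := state
  let (st, ss1) := pvPopA A i st0 ss0
  let ss := ss1 + pvSeg A i st
  (max res ss, i :: st, ss)

def maximumBooks (A : List Int) : Int :=
  ((PySem.List.pyRange 0 (A.length : Int) 1).foldl (pvStepA A) (0, [], 0)).1

-- ===== PORT B =====
-- B's inner backward scan 'for j in range(i-1,-1,-1): if A[j]-j < A[i]-i: prev=j; break',
-- ported as structural recursion on the Nat index being scanned (f, f-1, …, 0)
def pvScan (A : List Int) (i : Int) : Nat → Int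
  | 0 => if pvGet A 0 - 0 < pvGet A i - i then 0 else -1
  | Nat.succ j => if pvGet A (j + 1) - (j + 1) < pvGet A i - i then ((j : Int) + 1) else pvScan A i j

def pvPrev (A : List Int) (i : Int) : Int :=
  if 1 ≤ i then pvScan A i (i - 1).toNat else -1

def pvStepB (A : List Int) (state : Int × List Int) (i : Int) : Int × List Int :=
  let (best, dp) := state
  let prev := pvPrev A i
  let (l, base) :=
    if prev ≥ 0 then (i - prev, PySem.List.pyGetD dp prev 0)
    else (min (i + 1) (pvGet A i), (0 : Int))
  let cnt := base + PySem.Int.floordiv ((pvGet A i + pvGet A i - l + 1) * l) 2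
  (max best cnt, dp ++ [cnt])

def maximumBooks_alt (A : List Int) : Int :=
  ((PySem.List.pyRange 0 (A.length : Int) 1).foldl (pvStepB A) (0, [])).1

-- ===== PRECONDITION & SPEC =====
def Spec_maximumBooks (A : List Int) (out : Int) : Prop := out = maximumBooks_alt A
instance (A : List Int) (out : Int) : Decidable (Spec_maximumBooks A out) := by unfold Spec_maximumBooks; infer_instance

-- ===== CLAIM (what is proved, stated in full; the proofs are below) =====
def Claim_equal_maximumBooks : Prop := ∀ (A : List Int), Dom_maximumBooks A → Spec_maximumBooks A (maximumBooks A)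

-- ===== LEMMAS AND PROOFS =====

-- Int-indexed form of B's backward scan: greatest m ≤ j with A[m]-m < A[i]-i, else -1
def pvFind (A : List Int) (i j : Int) : Int :=
  if j < 0 then -1
  else if pvGet A j - j < pvGet A i - i then j else pvFind A i (j - 1)
termination_by (j + 1).toNat
decreasing_by omega

theorem pvFind_le_aux (A : List Int) (i : Int) :
    ∀ (n : Nat) (j : Int), -1 ≤ j → (j + 1).toNat ≤ n → pvFind A i j ≤ j ∧ -1 ≤ pvFind A i j := by
  intro n
  induction n with
  | zero =>
    intro j h0 hn
    have hje : j = -1 := by omega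
    subst hje
    rw [pvFind, if_pos (by norm_num)]
    omega
  | succ n ihn =>
    intro j h0 hn
    rw [pvFind]
    split_ifs with h1 h2
    · omega
    · omega
    · have := ihn (j - 1) (by omega) (by omega)
      omega

theorem pvFind_le (A : List Int) (i j : Int) (h0 : -1 ≤ j) :
    pvFind A i j ≤ j ∧ -1 ≤ pvFind A i j :=
  pvFind_le_aux A i (j + 1).toNat j h0 le_rfl

theorem pvFind_between (A : List Int) (i j m : Int) (h1 : pvFind A i j < m) (h2 : m ≤ j) :
    pvGet A i - i ≤ pvGet A m - m := by
  rw [pvFind] at h1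
  split_ifs at h1 with hj hk
  · omega
  · omega
  · by_cases hm : m = j
    · subst hm; omega
    · exact pvFind_between A i (j - 1) m h1 (by omega)
termination_by (j + 1).toNat
decreasing_by omega

theorem pvFind_skip (A : List Int) (i j j' : Int) (h0 : -1 ≤ j') (hle : j' ≤ j)
    (hmid : ∀ m, j' < m → m ≤ j → pvGet A i - i ≤ pvGet A m - m) :
    pvFind A i j = pvFind A i j' := by
  by_cases he : j = j'
  · rw [he]
  · have hj : j' < j := by omega
    rw [pvFind, if_neg (by omega : ¬ j < 0),
        if_neg (by have := hmid j hj le_rfl; omega)]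
    exact pvFind_skip A i (j - 1) j' h0 (by omega) (fun m hm1 hm2 => hmid m hm1 (by omega))
termination_by (j - j').toNat
decreasing_by omega

theorem pvScan_eq_find (A : List Int) (i : Int) (f : Nat) :
    pvScan A i f = pvFind A i (f : Int) := by
  induction f with
  | zero =>
    have e1 : pvFind A i (-1 : Int) = -1 := by rw [pvFind]; norm_num
    rw [pvScan, pvFind]
    norm_num
    rw [e1]
  | succ j ih =>
    have h1 : ¬(((j : Nat) : Int) + 1 < 0) := by omega
    rw [pvScan, pvFind]
    push_cast
    rw [if_neg h1, show ((j : Int) + 1) - 1 = (j : Int) from by ring, ih]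

theorem pvPrev_eq_find (A : List Int) (i : Int) (h : 0 ≤ i) :
    pvPrev A i = pvFind A i (i - 1) := by
  unfold pvPrev
  by_cases h1 : 1 ≤ i
  · rw [if_pos h1, pvScan_eq_find]
    congr 1
    omega
  · rw [if_neg h1]
    have hi : i = 0 := by omega
    subst hi
    rw [pvFind, if_pos (by norm_num)]

-- the chain of prev-links: exactly A's stack (top first)
def pvChain (A : List Int) (j : Int) : List Int :=
  if j < 0 then [] else j :: pvChain A (pvFind A j (j - 1))
termination_by (j + 1).toNat
decreasing_by have := pvFind_le A j (j - 1) (by omega); omega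

-- total segment sum carried by a stack (head = top)
def pvDpSum (A : List Int) : List Int → Int
  | [] => 0
  | j :: rest => pvSeg A j rest + pvDpSum A rest

-- pure pop (proof helper factoring A's while loop)
def pvDrop (A : List Int) (i : Int) : List Int → List Int
  | [] => []
  | j :: rest => if pvGet A j + (i - j) ≥ pvGet A i then pvDrop A i rest else j :: rest

theorem pvPopA_eq (A : List Int) (i : Int) (st : List Int) :
    pvPopA A i st (pvDpSum A st) = (pvDrop A i st, pvDpSum A (pvDrop A i st)) := by
  induction st with
  | nil => simp [pvPopA, pvDrop]
  | cons j rest ih =>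
    simp only [pvPopA, pvDrop, pvDpSum]
    split
    · have : pvSeg A j rest + pvDpSum A rest - pvSeg A j rest = pvDpSum A rest := by ring
      rw [this, ih]
    · rfl

theorem pvDrop_chain (A : List Int) (i j : Int) (hij : j < i) :
    pvDrop A i (pvChain A j) = pvChain A (pvFind A i j) := by
  by_cases hj : j < 0
  · rw [pvChain, if_pos hj, pvFind, if_pos hj, pvChain, if_pos (by norm_num)]
    rfl
  · have hcj : pvChain A j = j :: pvChain A (pvFind A j (j - 1)) := by
      conv_lhs => rw [pvChain]
      rw [if_neg hj]
    have hfle := pvFind_le A j (j - 1) (by omega)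
    rw [hcj]
    by_cases hk : pvGet A j - j < pvGet A i - i
    · have hfij : pvFind A i j = j := by
        rw [pvFind, if_neg hj, if_pos hk]
      simp only [pvDrop]
      rw [if_neg (by omega), hfij, hcj]
    · have hfij : pvFind A i j = pvFind A i (j - 1) := by
        rw [pvFind, if_neg hj, if_neg hk]
      simp only [pvDrop]
      rw [if_pos (by omega), pvDrop_chain A i (pvFind A j (j - 1)) (by omega)]
      congr 1
      rw [hfij]
      symm
      apply pvFind_skip A i (j - 1) (pvFind A j (j - 1)) (by omega) (by omega)
      intro m hm1 hm2
      have := pvFind_between A j (j - 1) m hm1 hm2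
      omega
termination_by (j + 1).toNat
decreasing_by have := pvFind_le A j (j - 1) (by omega); omega

theorem pyGetD_append_of_lt (dp : List Int) (x j : Int) (h0 : 0 ≤ j) (h : j < (dp.length : Int)) :
    PySem.List.pyGetD (dp ++ [x]) j 0 = PySem.List.pyGetD dp j 0 := by
  rw [PySem.List.pyGetD_eq_getElem _ _ h0 (by simp only [List.length_append, List.length_cons, List.length_nil]; push_cast; omega),
      PySem.List.pyGetD_eq_getElem _ _ h0 h]
  exact List.getElem_append_left (by omega)

theorem pyGetD_append_self (dp : List Int) (x : Int) :
    PySem.List.pyGetD (dp ++ [x]) (dp.length : Int) 0 = x := by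
  rw [PySem.List.pyGetD_eq_getElem _ _ (by positivity) (by simp only [List.length_append, List.length_cons, List.length_nil]; push_cast; omega)]
  simp

-- the joint loop invariant after k iterations
theorem pvInv (A : List Int) (k : Nat) :
    ((PySem.List.pyRange 0 (k : Int) 1).foldl (pvStepA A) (0, [], 0)).2.1
        = pvChain A ((k : Int) - 1) ∧
    ((PySem.List.pyRange 0 (k : Int) 1).foldl (pvStepA A) (0, [], 0)).2.2
        = pvDpSum A (pvChain A ((k : Int) - 1)) ∧
    ((PySem.List.pyRange 0 (k : Int) 1).foldl (pvStepB A) (0, [])).2.length = k ∧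
    (∀ j : Nat, j < k →
      PySem.List.pyGetD ((PySem.List.pyRange 0 (k : Int) 1).foldl (pvStepB A) (0, [])).2 (j : Int) 0
        = pvDpSum A (pvChain A (j : Int))) ∧
    ((PySem.List.pyRange 0 (k : Int) 1).foldl (pvStepA A) (0, [], 0)).1
        = ((PySem.List.pyRange 0 (k : Int) 1).foldl (pvStepB A) (0, [])).1 := by
  induction k with
  | zero =>
    rw [PySem.List.pyRange_one_eq_nil (by norm_num)]
    refine ⟨?_, ?_, rfl, by omega, rfl⟩
    · rw [pvChain, if_pos (by norm_num)]; rfl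
    · rw [pvChain, if_pos (by norm_num)]; rfl
  | succ k ih =>
    obtain ⟨hstk, hss, hlen, hdp, hres⟩ := ih
    have hrange : PySem.List.pyRange 0 ((k : Int) + 1) 1
        = PySem.List.pyRange 0 (k : Int) 1 ++ [(k : Int)] :=
      PySem.List.pyRange_one_succ_right (by omega)
    have hcast : (((k + 1 : Nat)) : Int) = (k : Int) + 1 := by push_cast; ring
    have hk1 : (k : Int) + 1 - 1 = (k : Int) := by ring
    rcases eA : (PySem.List.pyRange 0 (k : Int) 1).foldl (pvStepA A) (0, [], 0) with ⟨res, st, ss⟩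
    rcases eB : (PySem.List.pyRange 0 (k : Int) 1).foldl (pvStepB A) (0, []) with ⟨best, dp⟩
    rw [eA] at hstk hss hres
    rw [eB] at hlen hdp hres
    dsimp only at hstk hss hres hlen hdp
    rw [hcast, hrange, List.foldl_append, List.foldl_append, hk1, eA, eB]
    simp only [List.foldl_cons, List.foldl_nil]
    set p := pvFind A (k : Int) ((k : Int) - 1) with hp
    have hple := pvFind_le A (k : Int) ((k : Int) - 1) (by omega)
    have hck : pvChain A (k : Int) = (k : Int) :: pvChain A p := by
      rw [pvChain, if_neg (by omega)]
    have hA2 : pvStepA A (res, st, ss) (k : Int)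
        = (max res (pvDpSum A (pvChain A p) + pvSeg A (k : Int) (pvChain A p)),
           (k : Int) :: pvChain A p,
           pvDpSum A (pvChain A p) + pvSeg A (k : Int) (pvChain A p)) := by
      simp only [pvStepA]
      rw [hstk, hss, pvPopA_eq, pvDrop_chain A (k : Int) ((k : Int) - 1) (by omega), ← hp]
    have hB2 : pvStepB A (best, dp) (k : Int)
        = (max best (pvDpSum A (pvChain A p) + pvSeg A (k : Int) (pvChain A p)),
           dp ++ [pvDpSum A (pvChain A p) + pvSeg A (k : Int) (pvChain A p)]) := by
      simp only [pvStepB]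
      rw [pvPrev_eq_find A (k : Int) (by omega), ← hp]
      by_cases hp0 : p ≥ 0
      · rw [if_pos hp0]
        have hbase : PySem.List.pyGetD dp p 0 = pvDpSum A (pvChain A p) := by
          have h2 := hdp p.toNat (by omega)
          rwa [Int.toNat_of_nonneg hp0] at h2
        have hcp : pvChain A p = p :: pvChain A (pvFind A p (p - 1)) := by
          rw [pvChain, if_neg (by omega)]
        rw [hbase, hcp]
        simp only [pvSeg]
      · rw [if_neg hp0]
        have hcp : pvChain A p = [] := by
          rw [pvChain, if_pos (by omega)]
        rw [hcp]
        simp only [pvSeg, pvDpSum]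
    refine ⟨?_, ?_, ?_, ?_, ?_⟩
    · rw [hA2, hck]
    · rw [hA2, hck]
      simp only [pvDpSum]
      all_goals ring
    · rw [hB2]
      simp [hlen]
    · intro j hj
      rw [hB2]
      dsimp only
      by_cases hjk : j < k
      · rw [pyGetD_append_of_lt dp _ (j : Int) (by omega) (by rw [hlen]; omega)]
        exact hdp j hjk
      · have hje : j = k := by omega
        subst hje
        rw [show ((j : Nat) : Int) = ((dp.length : Nat) : Int) from by rw [hlen],
            pyGetD_append_self, hlen, hck]
        simp only [pvDpSum]
        ring
    · rw [hA2, hB2]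
      dsimp only
      rw [hres]

-- ===== VERDICT (by name: the statement is the Claim_ definition above) =====
theorem maximumBooks_spec : Claim_equal_maximumBooks := by
  intro A _
  show maximumBooks A = maximumBooks_alt A
  unfold maximumBooks maximumBooks_alt
  exact (pvInv A A.length).2.2.2.2
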